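-- pv_equiv track=rewrite | github.com/Yahya20051937/Calculator | math_calcul2/helping_function2.py | get_elements_after
-- ===== SOURCE A (Python) =====
-- def get_elements_after(string, x):
--     result = []
--     found_x = False
--
--     for char in string:
--         if found_x:
--             result.append(char)
--         if char == x:
--             found_x = True
--
--     return ''.join(result)
-- ===== SOURCE B (Python) =====
-- def get_elements_after(string, x):
--     idx = next((i for i, c in enumerate(string) if c == x), -1)
--     return string[idx + 1:] if idx >= 0 else ''
-- ===== Notes on version B (the rewrite author's own statement) =====
-- stated objective: idiomatic
-- what changed: Replaces the flag-driven char-by-char accumulation with a locate-then-slice decomposition: find the index of the first character equal to x, then return the slice after it (or '' if absent).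
import Mathlib
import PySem

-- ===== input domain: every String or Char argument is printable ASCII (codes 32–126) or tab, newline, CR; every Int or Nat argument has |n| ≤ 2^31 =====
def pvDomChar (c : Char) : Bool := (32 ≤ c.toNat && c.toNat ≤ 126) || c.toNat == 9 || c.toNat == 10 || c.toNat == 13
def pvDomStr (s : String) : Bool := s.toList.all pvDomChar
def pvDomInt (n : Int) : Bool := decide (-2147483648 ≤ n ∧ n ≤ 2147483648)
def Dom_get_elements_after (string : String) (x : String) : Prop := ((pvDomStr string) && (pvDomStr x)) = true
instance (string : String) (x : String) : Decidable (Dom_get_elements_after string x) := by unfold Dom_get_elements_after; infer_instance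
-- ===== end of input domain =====

-- ===== PORT A =====
-- B replaces A's flag-driven char accumulation with a locate-then-slice decomposition (idiomatic, same O(n) cost).
-- flag-driven accumulation: append chars once the flag is set; set the flag when char == x
def pvStepA (x : String) (st : List Char × Bool) (c : Char) : List Char × Bool :=
  let r := if st.2 then st.1 ++ [c] else st.1
  let f := if String.mk [c] = x then true else st.2
  (r, f)

def get_elements_after (string : String) (x : String) : String :=
  String.mk ((string.toList.foldl (pvStepA x) ([], false)).1)

-- ===== PORT B =====
-- B: locate the first char equal to x, then slice after it
def get_elements_after_alt (string : String) (x : String) : String :=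
  match string.toList.findIdx? (fun c => String.mk [c] == x) with
  | some i => String.mk (string.toList.drop (i + 1))
  | none => ""

-- ===== PRECONDITION & SPEC =====
def Spec_get_elements_after (string : String) (x : String) (out : String) : Prop := out = get_elements_after_alt string x
instance (string : String) (x : String) (out : String) : Decidable (Spec_get_elements_after string x out) := by unfold Spec_get_elements_after; infer_instance

-- ===== CLAIM (what is proved, stated in full; the proofs are below) =====
def Claim_equal_get_elements_after : Prop := ∀ (string : String) (x : String), Dom_get_elements_after string x → Spec_get_elements_after string x (get_elements_after string x)

-- ===== LEMMAS AND PROOFS =====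

theorem pv_foldA_true (x : String) (l acc : List Char) :
    l.foldl (pvStepA x) (acc, true) = (acc ++ l, true) := by
  induction l generalizing acc with
  | nil => simp
  | cons c t ih => simp [pvStepA, ih]

theorem pv_main (x : String) (l : List Char) :
    (l.foldl (pvStepA x) ([], false)).1 =
      match l.findIdx? (fun c => String.mk [c] == x) with
      | some i => l.drop (i + 1)
      | none => ([] : List Char) := by
  induction l with
  | nil => simp
  | cons c t ih =>
    by_cases h : String.mk [c] = x
    · simp [pvStepA, h, List.findIdx?_cons, pv_foldA_true]
    · simp only [List.foldl_cons, pvStepA, if_neg h, Bool.false_eq_true, if_false]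
      rw [ih]
      simp [List.findIdx?_cons, h]
      cases hf : t.findIdx? (fun c => String.mk [c] == x) <;> simp

-- ===== VERDICT (by name: the statement is the Claim_ definition above) =====
theorem get_elements_after_spec : Claim_equal_get_elements_after := by
  intro string x _
  unfold Spec_get_elements_after get_elements_after get_elements_after_alt
  rw [pv_main]
  cases h : string.toList.findIdx? (fun c => String.mk [c] == x) <;> simp <;> rfl
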